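-- pv_equiv track=rewrite | github.com/kanghyeongjoo/hj_hdel_py | layout_data(Floor Info)_V5.py | floor_Special_Character_slpit
-- ===== SOURCE A (Python) =====
-- def floor_Special_Character_slpit(floor_and_floor_hight):
--
--     comma_split = {}
--     for before_floor, hight in floor_and_floor_hight.items():
--         if "," not in before_floor:
--             comma_split.update({before_floor: hight})
--         elif "," in before_floor:
--             comma_split_list = before_floor.split(",")
--             for sp_floor in comma_split_list:
--                 comma_split.update({sp_floor: hight})
--
--     tilde_split = {}
--     for before_floor, hight in comma_split.items():
--         if "~" not in before_floor:
--             tilde_split.update({before_floor: hight})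
--         elif "~" in before_floor:
--             for text_index, floor_text in enumerate(before_floor):
--                 if floor_text == "~":
--                     start_no = int(before_floor[:text_index])
--                     end_no = int(before_floor[text_index + 1:])
--                     for tilde_floor in range(start_no, end_no + 1):
--                         tilde_split.update({str(tilde_floor): hight})
--
--     return tilde_split
-- ===== SOURCE B (Python) =====
-- def floor_Special_Character_slpit(floor_and_floor_hight):
--     result = {}
--     for key, hight in floor_and_floor_hight.items():
--         for piece in key.split(","):
--             if "~" not in piece:
--                 result[piece] = hight
--             else:
--                 i = piece.index("~")
--                 for n in range(int(piece[:i]), int(piece[i + 1:]) + 1):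
--                     result[str(n)] = hight
--     return result
-- ===== Notes on version B (the rewrite author's own statement) =====
-- stated objective: simpler
-- what changed: B is a single pass that builds the result dict directly from each comma-piece (locating the one tilde with index and slicing), eliminating A's intermediate comma_split dict and its char-by-char enumerate scan for tildes.
import Mathlib
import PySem

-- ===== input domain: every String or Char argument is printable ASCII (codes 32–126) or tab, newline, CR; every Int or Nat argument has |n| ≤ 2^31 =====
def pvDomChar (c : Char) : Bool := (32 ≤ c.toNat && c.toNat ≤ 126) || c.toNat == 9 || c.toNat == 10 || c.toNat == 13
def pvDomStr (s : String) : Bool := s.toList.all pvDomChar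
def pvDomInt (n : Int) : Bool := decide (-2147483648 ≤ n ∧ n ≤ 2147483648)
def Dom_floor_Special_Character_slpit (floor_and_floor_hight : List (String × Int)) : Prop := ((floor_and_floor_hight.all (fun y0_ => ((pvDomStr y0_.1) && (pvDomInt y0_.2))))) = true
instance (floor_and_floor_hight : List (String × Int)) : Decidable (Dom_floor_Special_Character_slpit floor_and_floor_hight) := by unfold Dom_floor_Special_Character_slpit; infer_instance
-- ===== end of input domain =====

-- B builds the result dict in one pass directly from each comma-piece (first '~' located by
-- index and sliced), eliminating A's intermediate comma_split dict and its char-by-char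
-- enumerate scan for tildes; same cost, simpler decomposition (return-value equivalence).


-- ===== PORT A =====
-- int(...) raises ValueError exactly where PySem.Int.ofStr? is none; those inputs are excluded
-- by Pre_floor_Special_Character_slpit, so the `.getD 0` default is never reached there.
-- loop body of A's first pass (comma split)
def pvA_comma_body (d : PySem.Dict String Int) (kv : String × Int) : PySem.Dict String Int :=
  if PySem.Str.isIn "," kv.1 = false then
    d.insert kv.1 kv.2
  else
    ((PySem.Str.split? kv.1 ",").getD []).foldl (fun d sp_floor => d.insert sp_floor kv.2) d

-- loop body of A's second pass (tilde expansion by scanning every character)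
def pvA_tilde_body (d : PySem.Dict String Int) (kv : String × Int) : PySem.Dict String Int :=
  if PySem.Str.isIn "~" kv.1 = false then
    d.insert kv.1 kv.2
  else
    (PySem.List.enumerate kv.1.toList).foldl (fun d ic =>
      if ic.2 = '~' then
        let start_no : Int := (PySem.Int.ofStr? (PySem.Str.slice kv.1 none (some ic.1))).getD 0
        let end_no : Int := (PySem.Int.ofStr? (PySem.Str.slice kv.1 (some (ic.1 + 1)) none)).getD 0
        (PySem.List.pyRange start_no (end_no + 1) 1).foldl
          (fun d tilde_floor => d.insert (PySem.Int.toStr tilde_floor) kv.2) d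
      else d) d

def floor_Special_Character_slpit (floor_and_floor_hight : List (String × Int)) : List (String × Int) :=
  ((floor_and_floor_hight.foldl pvA_comma_body PySem.Dict.empty).items.foldl
    pvA_tilde_body PySem.Dict.empty).items

-- ===== PORT B =====
-- loop body of B's single pass, for one comma-piece under height hight
def pvB_piece_body (hight : Int) (d : PySem.Dict String Int) (piece : String) : PySem.Dict String Int :=
  if PySem.Str.isIn "~" piece = false then
    d.insert piece hight
  else
    let i : Int := PySem.Str.find piece "~"
    let start_no : Int := (PySem.Int.ofStr? (PySem.Str.slice piece none (some i))).getD 0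
    let end_no : Int := (PySem.Int.ofStr? (PySem.Str.slice piece (some (i + 1)) none)).getD 0
    (PySem.List.pyRange start_no (end_no + 1) 1).foldl
      (fun d n => d.insert (PySem.Int.toStr n) hight) d

def floor_Special_Character_slpit_alt (floor_and_floor_hight : List (String × Int)) : List (String × Int) :=
  (floor_and_floor_hight.foldl (fun d kv =>
      ((PySem.Str.split? kv.1 ",").getD []).foldl (pvB_piece_body kv.2) d)
    PySem.Dict.empty).items

-- ===== PRECONDITION & SPEC =====
-- the comma-pieces of all keys, in order
def pvPieces_floor_Special_Character_slpit (floor_and_floor_hight : List (String × Int)) : List String :=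
  floor_and_floor_hight.flatMap (fun kv => (PySem.Str.split? kv.1 ",").getD [])

-- Pre_ (a) requires every comma-piece containing '~' to carry exactly one '~' with an
-- int-parsable string on each side — otherwise Python's int() raises ValueError in A (and in B);
-- and (b), only when such a tilde-range piece is present, excludes inputs whose comma-pieces are
-- not pairwise distinct: A returns there, but its value hinges on dict re-insertion/
-- de-duplication order in the intermediate comma_split dict, an accidental corner on which B's
-- straightforward last-write-wins is equally defensible.
def Pre_floor_Special_Character_slpit (floor_and_floor_hight : List (String × Int)) : Prop :=
  (∀ p ∈ pvPieces_floor_Special_Character_slpit floor_and_floor_hight,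
    PySem.Str.isIn "~" p = true →
      p.toList.count '~' = 1 ∧
      (PySem.Int.ofStr? (PySem.Str.slice p none (some (PySem.Str.find p "~")))).isSome = true ∧
      (PySem.Int.ofStr? (PySem.Str.slice p (some (PySem.Str.find p "~" + 1)) none)).isSome = true) ∧
  ((∃ p ∈ pvPieces_floor_Special_Character_slpit floor_and_floor_hight,
      PySem.Str.isIn "~" p = true) →
    (pvPieces_floor_Special_Character_slpit floor_and_floor_hight).Nodup)

instance (floor_and_floor_hight : List (String × Int)) : Decidable (Pre_floor_Special_Character_slpit floor_and_floor_hight) := by unfold Pre_floor_Special_Character_slpit; infer_instance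

def pvWitness_floor_Special_Character_slpit : (List (String × Int)) := [("1~3,B2", 5), ("7", 1)]

def Spec_floor_Special_Character_slpit (floor_and_floor_hight : List (String × Int)) (out : List (String × Int)) : Prop := out = floor_Special_Character_slpit_alt floor_and_floor_hight
instance (floor_and_floor_hight : List (String × Int)) (out : List (String × Int)) : Decidable (Spec_floor_Special_Character_slpit floor_and_floor_hight out) := by unfold Spec_floor_Special_Character_slpit; infer_instance

-- ===== CLAIM (what is proved, stated in full; the proofs are below) =====
def Claim_equal_floor_Special_Character_slpit : Prop := ∀ (floor_and_floor_hight : List (String × Int)), Dom_floor_Special_Character_slpit floor_and_floor_hight → Pre_floor_Special_Character_slpit floor_and_floor_hight → Spec_floor_Special_Character_slpit floor_and_floor_hight (floor_Special_Character_slpit floor_and_floor_hight)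

-- ===== LEMMAS AND PROOFS =====

-- s.split(",") on a comma-free string is [s]: the splitOn worker never cuts
theorem pv_go_no_sep : ∀ (fuel : Nat) (l cur : List Char) (acc : List (List Char)), ',' ∉ l → l.length ≤ fuel →
    PySem.Chars.splitOn.go [','] fuel l cur acc = ((cur.reverse ++ l) :: acc).reverse
  | 0, l, cur, acc, _, hlen => by
      have hl : l = [] := List.eq_nil_of_length_eq_zero (Nat.le_zero.mp hlen)
      subst hl; simp [PySem.Chars.splitOn.go]
  | fuel + 1, [], cur, acc, _, _ => by
      simp [PySem.Chars.splitOn.go]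
  | fuel + 1, c :: rest, cur, acc, h, hlen => by
      have hc : c ≠ ',' := fun e => h (e ▸ List.mem_cons_self ..)
      have hrest : ',' ∉ rest := fun m => h (List.mem_cons_of_mem _ m)
      have ih := pv_go_no_sep fuel rest (c :: cur) acc hrest (by simpa using hlen)
      rw [show PySem.Chars.splitOn.go [','] (fuel + 1) (c :: rest) cur acc
            = PySem.Chars.splitOn.go [','] fuel rest (c :: cur) acc from by
          simp [PySem.Chars.splitOn.go, List.isPrefixOf, Ne.symm hc], ih]
      simp

theorem pv_split_no_comma (s : String) (h : PySem.Str.isIn "," s = false) :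
    (PySem.Str.split? s ",").getD [] = [s] := by
  have h' : PySem.Chars.isIn [','] s.toList = false := by
    have he := PySem.Str.isIn_eq "," s
    rw [h] at he; exact he.symm
  have hmem : ',' ∉ s.toList := by
    intro hm
    obtain ⟨u, v, he⟩ := List.append_of_mem hm
    have hinf : [','] <:+: s.toList := ⟨u, v, by rw [he]; simp⟩
    have htrue := (PySem.Chars.isIn_iff_infix [','] s.toList).mpr hinf
    rw [h'] at htrue
    exact Bool.false_ne_true htrue
  have hgo := pv_go_no_sep (s.toList.length + 1) s.toList [] [] hmem (by omega)
  have hsplitOn : PySem.Chars.splitOn s.toList [','] = [s.toList] := by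
    unfold PySem.Chars.splitOn
    rw [hgo]; simp
  simp [PySem.Str.split?, PySem.Chars.split?, hsplitOn]

-- the flattened (piece, height) work list
def pvP (floor_and_floor_hight : List (String × Int)) : List (String × Int) :=
  floor_and_floor_hight.flatMap (fun kv => ((PySem.Str.split? kv.1 ",").getD []).map (fun p => (p, kv.2)))

-- A's first pass is a plain insert-fold over the flattened piece list
theorem pv_pass1 (l : List (String × Int)) (d : PySem.Dict String Int) :
    l.foldl pvA_comma_body d = (pvP l).foldl (fun d pv => d.insert pv.1 pv.2) d := by
  induction l generalizing d with
  | nil => simp [pvP]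
  | cons kv t ih =>
      rw [List.foldl_cons, ih]
      show _ = (pvP (kv :: t)).foldl _ d
      rw [show pvP (kv :: t)
            = ((PySem.Str.split? kv.1 ",").getD []).map (fun p => (p, kv.2)) ++ pvP t from by
          simp [pvP]]
      rw [List.foldl_append]
      congr 1
      unfold pvA_comma_body
      by_cases hc : PySem.Str.isIn "," kv.1 = false
      · rw [if_pos hc, pv_split_no_comma kv.1 hc]; simp
      · rw [if_neg hc, List.foldl_map]

theorem pv_map_fst (l : List (String × Int)) :
    (pvP l).map Prod.fst = pvPieces_floor_Special_Character_slpit l := by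
  simp [pvP, pvPieces_floor_Special_Character_slpit, List.map_flatMap, List.map_map, Function.comp_def]

-- an insert-fold of pairwise-distinct fresh keys into the empty dict lists exactly its input
theorem pv_fold_items (Q : List (String × Int)) (h2 : (Q.map Prod.fst).Nodup) :
    (Q.foldl (fun d pv => d.insert pv.1 pv.2) (PySem.Dict.empty : PySem.Dict String Int)).items = Q := by
  have h1 : ∀ a ∈ Q, (PySem.Dict.empty : PySem.Dict String Int).contains a.1 = false := by
    intro a _; simp [PySem.Dict.contains_empty]
  have h3 := PySem.Dict.items_foldl_insert_fresh Q Prod.fst Prod.snd PySem.Dict.empty h1 h2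
  simpa using h3

-- an insert-fold keeps the dict's keys pairwise distinct
theorem pv_keys_nodup (Q : List (String × Int)) : ∀ (d : PySem.Dict String Int),
    d.keys.Nodup → ((Q.foldl (fun d pv => d.insert pv.1 pv.2) d).keys).Nodup := by
  induction Q with
  | nil => intro d h; simpa using h
  | cons kv t ih =>
      intro d h
      rw [List.foldl_cons]
      exact ih _ (PySem.Dict.nodup_keys_insert d kv.1 kv.2 h)

-- every key of an insert-fold comes from the start dict or from the inserted pairs
theorem pv_keys_sub (Q : List (String × Int)) : ∀ (d : PySem.Dict String Int) (k : String),
    k ∈ (Q.foldl (fun d pv => d.insert pv.1 pv.2) d).keys → k ∈ d.keys ∨ k ∈ Q.map Prod.fst := by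
  induction Q with
  | nil => intro d k h; exact Or.inl h
  | cons kv t ih =>
      intro d k h
      rw [List.foldl_cons] at h
      rcases ih _ k h with h' | h'
      · rcases (PySem.Dict.mem_keys_insert _ _ _ _).mp h' with h'' | h''
        · exact Or.inr (by simp [h''])
        · exact Or.inl h''
      · exact Or.inr (List.mem_cons_of_mem _ h')

-- a fold of the '~'-guarded body over enumerate skips tilde-free segments
theorem pv_enum_skip (g : PySem.Dict String Int → Int → PySem.Dict String Int)
    (u : List Char) (hu : '~' ∉ u) : ∀ (s : Int) (d : PySem.Dict String Int),
    (PySem.List.enumerate u s).foldl (fun d ic => if ic.2 = '~' then g d ic.1 else d) d = d := by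
  induction u with
  | nil => intro s d; simp [PySem.List.enumerate_nil]
  | cons c t ih =>
      intro s d
      have hc : c ≠ '~' := fun e => hu (e ▸ List.mem_cons_self ..)
      rw [PySem.List.enumerate_cons, List.foldl_cons]
      simp only [hc, if_false]
      exact ih (fun m => hu (List.mem_cons_of_mem _ m)) (s + 1) d

-- … and fires exactly once, at the unique '~', with its absolute index
theorem pv_enum_fire (g : PySem.Dict String Int → Int → PySem.Dict String Int)
    (u v : List Char) (hu : '~' ∉ u) (hv : '~' ∉ v) (d : PySem.Dict String Int) :
    (PySem.List.enumerate (u ++ '~' :: v) 0).foldl (fun d ic => if ic.2 = '~' then g d ic.1 else d) d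
      = g d (u.length : Int) := by
  rw [PySem.List.enumerate_append, List.foldl_append, pv_enum_skip g u hu,
    PySem.List.enumerate_cons, List.foldl_cons, pv_enum_skip g v hv]
  norm_num

-- the first '~' of u ++ '~' :: v ('~' ∉ u) is at index u.length
theorem pv_find_tilde (u v : List Char) (hu : '~' ∉ u) :
    PySem.Chars.find (u ++ '~' :: v) ['~'] = (u.length : Int) := by
  have hinf : ['~'] <:+: u ++ '~' :: v := ⟨u, v, by simp⟩
  have h0 : 0 ≤ PySem.Chars.find (u ++ '~' :: v) ['~'] :=
    (PySem.Chars.find_nonneg_iff _ _).mpr hinf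
  obtain ⟨hpre, hmin⟩ := PySem.Chars.find_spec h0
  have hju : (PySem.Chars.find (u ++ '~' :: v) ['~']).toNat ≤ u.length := by
    by_contra hlt
    exact hmin u.length (Nat.lt_of_not_le hlt) ⟨v, by simp⟩
  have huj : ¬ (PySem.Chars.find (u ++ '~' :: v) ['~']).toNat < u.length := by
    intro hlt
    obtain ⟨t, ht⟩ := hpre
    have hget : (u ++ '~' :: v)[(PySem.Chars.find (u ++ '~' :: v) ['~']).toNat]? = some '~' := by
      have h0' : ((u ++ '~' :: v).drop (PySem.Chars.find (u ++ '~' :: v) ['~']).toNat)[0]? = some '~' := by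
        rw [← ht]; rfl
      simpa [List.getElem?_drop] using h0'
    have hu' : u[(PySem.Chars.find (u ++ '~' :: v) ['~']).toNat]? = some '~' := by
      rwa [List.getElem?_append_left hlt] at hget
    exact hu (List.mem_of_getElem? hu')
  have hj : (PySem.Chars.find (u ++ '~' :: v) ['~']).toNat = u.length :=
    le_antisymm hju (Nat.le_of_not_lt huj)
  omega

-- a first-occurrence split for a character occurring exactly once
theorem pv_count_one_split (c : Char) (l : List Char) (h : l.count c = 1) :
    ∃ u v, l = u ++ c :: v ∧ c ∉ u ∧ c ∉ v := by
  induction l with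
  | nil => simp at h
  | cons a t ih =>
      by_cases hac : a = c
      · subst hac
        have hz : t.count a = 0 := by simpa [List.count_cons] using h
        exact ⟨[], t, rfl, by simp, List.count_eq_zero.mp hz⟩
      · have h1 : t.count c = 1 := by simpa [List.count_cons, hac] using h
        obtain ⟨u, v, rfl, hcu, hcv⟩ := ih h1
        refine ⟨a :: u, v, rfl, ?_, hcv⟩
        simp only [List.mem_cons, not_or]
        exact ⟨fun e => hac e.symm, hcu⟩

theorem pv_mem_pieces {l : List (String × Int)} {pv : String × Int} (h : pv ∈ pvP l) :
    pv.1 ∈ pvPieces_floor_Special_Character_slpit l := by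
  simp only [pvP, List.mem_flatMap, List.mem_map] at h
  obtain ⟨kv, hkv, p, hp, rfl⟩ := h
  exact List.mem_flatMap.mpr ⟨kv, hkv, hp⟩

-- the two per-piece bodies agree on every piece admitted by Pre_
theorem pv_body_eq (p : String) (h : Int) (d : PySem.Dict String Int)
    (hp : PySem.Str.isIn "~" p = true → p.toList.count '~' = 1) :
    pvA_tilde_body d (p, h) = pvB_piece_body h d p := by
  unfold pvA_tilde_body pvB_piece_body
  dsimp only
  by_cases ht : PySem.Str.isIn "~" p = false
  · rw [if_pos ht, if_pos ht]
  · rw [if_neg ht, if_neg ht]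
    have hc : p.toList.count '~' = 1 := hp (Bool.not_eq_false _ ▸ ht)
    obtain ⟨u, v, hsplit, hu, hv⟩ := pv_count_one_split '~' p.toList hc
    have hfind : PySem.Str.find p "~" = (u.length : Int) := by
      rw [PySem.Str.find_eq, show ("~" : String).toList = ['~'] from rfl, hsplit,
        pv_find_tilde u v hu]
    rw [hfind, hsplit]
    exact pv_enum_fire (fun d i =>
      (PySem.List.pyRange ((PySem.Int.ofStr? (PySem.Str.slice p none (some i))).getD 0)
          (((PySem.Int.ofStr? (PySem.Str.slice p (some (i + 1)) none)).getD 0) + 1) 1).foldl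
        (fun d n => d.insert (PySem.Int.toStr n) h) d) u v hu hv d

-- B's nested fold is the flat fold of its per-piece body over the flattened piece list
theorem pv_B_flat (l : List (String × Int)) :
    l.foldl (fun d kv => ((PySem.Str.split? kv.1 ",").getD []).foldl (pvB_piece_body kv.2) d)
        (PySem.Dict.empty : PySem.Dict String Int)
      = (pvP l).foldl (fun d pv => pvB_piece_body pv.2 d pv.1) PySem.Dict.empty := by
  rw [pvP, List.foldl_flatMap]
  simp only [List.foldl_map]

-- ===== VERDICT (by name: the statement is the Claim_ definition above) =====
theorem floor_Special_Character_slpit_spec : Claim_equal_floor_Special_Character_slpit := by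
  intro l _ hpre
  obtain ⟨hp, hpnd⟩ := hpre
  unfold Spec_floor_Special_Character_slpit
  unfold floor_Special_Character_slpit floor_Special_Character_slpit_alt
  rw [pv_pass1, pv_B_flat]
  by_cases hex : ∃ p ∈ pvPieces_floor_Special_Character_slpit l, PySem.Str.isIn "~" p = true
  · -- a tilde-range piece exists: Pre_ gives pairwise-distinct pieces
    have hnd := hpnd hex
    rw [pv_fold_items (pvP l) (by rw [pv_map_fst]; exact hnd)]
    exact congrArg PySem.Dict.items
      (PySem.List.foldl_congr_mem (pvP l) pvA_tilde_body
        (fun d pv => pvB_piece_body pv.2 d pv.1) PySem.Dict.empty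
        (fun acc pv hmem =>
          pv_body_eq pv.1 pv.2 acc (fun ht => ((hp pv.1 (pv_mem_pieces hmem)) ht).1)))
  · -- no piece contains '~': both passes are pure dict inserts
    have hno : ∀ p ∈ pvPieces_floor_Special_Character_slpit l, PySem.Str.isIn "~" p = false := by
      intro p hpmem
      by_contra hb
      exact hex ⟨p, hpmem, Bool.ne_false_iff.mp hb⟩
    have hBins : (pvP l).foldl (fun d pv => pvB_piece_body pv.2 d pv.1) PySem.Dict.empty
        = (pvP l).foldl (fun d pv => d.insert pv.1 pv.2) PySem.Dict.empty :=
      PySem.List.foldl_congr_mem (pvP l) _ _ PySem.Dict.empty (fun acc pv hmem => by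
        unfold pvB_piece_body
        rw [if_pos (hno pv.1 (pv_mem_pieces hmem))])
    rw [hBins]
    have hAins : ((pvP l).foldl (fun d pv => d.insert pv.1 pv.2) PySem.Dict.empty).items.foldl
          pvA_tilde_body PySem.Dict.empty
        = ((pvP l).foldl (fun d pv => d.insert pv.1 pv.2) PySem.Dict.empty).items.foldl
          (fun d pv => d.insert pv.1 pv.2) PySem.Dict.empty :=
      PySem.List.foldl_congr_mem _ _ _ PySem.Dict.empty (fun acc kv hkv => by
        have hk : kv.1 ∈ ((pvP l).foldl (fun d pv => d.insert pv.1 pv.2) PySem.Dict.empty).keys := by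
          simp only [PySem.Dict.keys]
          exact List.mem_map_of_mem hkv
        rcases pv_keys_sub (pvP l) PySem.Dict.empty kv.1 hk with h' | h'
        · simp [PySem.Dict.keys_empty] at h'
        · rw [pv_map_fst] at h'
          unfold pvA_tilde_body
          rw [if_pos (hno kv.1 h')])
    rw [hAins, pv_fold_items _ (by
      have hD := pv_keys_nodup (pvP l) PySem.Dict.empty (by simp [PySem.Dict.keys_empty])
      simpa [PySem.Dict.keys] using hD)]
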